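-- pv_equiv track=rewrite | github.com/Saviorovo/task5 | prework.py | get
-- ===== SOURCE A (Python) =====
-- def get(data):
--     poems=[]
--     cur=''
--     for it in data:
--         if it=='\n':
--             if cur:
--                 poems.append(str(cur))
--                 cur=''
--         else:
--             if it[-1]=='\n':
--                 cur+=it[:-1]
--             else:
--                 cur+=it
--     if cur:
--         poems.append(str(cur))
--     return poems
-- ===== SOURCE B (Python) =====
-- def get(data):
--     poems = []
--     i, n = 0, len(data)
--     while i < n:
--         if data[i] == '\n':
--             i += 1
--             continue
--         j = i
--         parts = []
--         while j < n and data[j] != '\n':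
--             it = data[j]
--             parts.append(it[:-1] if it[-1] == '\n' else it)
--             j += 1
--         s = ''.join(parts)
--         if s:
--             poems.append(s)
--         i = j
--     return poems
-- ===== Notes on version B (the rewrite author's own statement) =====
-- stated objective: alternative
-- what changed: Instead of A's single accumulator-threaded loop (a running 'cur' string flushed on blank lines and again after the loop), B scans the list run by run with two indices: it skips blank lines and, for each maximal run of non-blank lines, joins the newline-stripped lines in an inner loop and appends the result if non-empty, so no pending state crosses loop iterations and there is no post-loop flush.
import Mathlib
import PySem

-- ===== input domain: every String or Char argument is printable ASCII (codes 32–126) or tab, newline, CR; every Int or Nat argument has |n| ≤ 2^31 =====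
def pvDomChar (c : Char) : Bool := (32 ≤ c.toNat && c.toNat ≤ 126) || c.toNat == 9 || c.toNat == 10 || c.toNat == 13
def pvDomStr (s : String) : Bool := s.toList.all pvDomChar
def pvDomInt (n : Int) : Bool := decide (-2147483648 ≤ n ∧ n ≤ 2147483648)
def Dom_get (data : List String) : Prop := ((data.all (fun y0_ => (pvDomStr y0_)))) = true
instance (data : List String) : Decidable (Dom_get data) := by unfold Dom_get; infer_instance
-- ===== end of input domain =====

-- B replaces A's accumulator-threaded loop (pending 'cur' flushed on blanks and after the loop)
-- by a run-based scan: skip blank lines, join each maximal non-blank run in an inner loop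
-- (alternative decomposition, same cost). Both raise IndexError on lists containing "" (excluded by Pre_).


-- ===== PORT A =====
-- one loop step of A: a blank line flushes 'cur' (if non-empty); any other line is stripped of a
-- single trailing newline (it[-1] == '\n', it[:-1]) and appended to 'cur'
def getStep (st : List String × String) (it : String) : List String × String :=
  if it == "\n" then
    if st.2 == "" then st else (st.1 ++ [st.2], "")
  else if PySem.Str.pyGet? it (-1) == some '\n' then
    (st.1, st.2 ++ PySem.Str.slice it none (some (-1)))
  else
    (st.1, st.2 ++ it)

def get (data : List String) : List String :=
  let st := data.foldl getStep ([], "")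
  if st.2 == "" then st.1 else st.1 ++ [st.2]

-- ===== PORT B =====
-- Source B's per-line transform: it[:-1] if it[-1] == '\n' else it (it[-1] raises on "", outside Pre_)
def stripNl (it : String) : String :=
  if PySem.Str.pyGet? it (-1) == some '\n' then PySem.Str.slice it none (some (-1)) else it

-- Source B's outer while loop: skip one blank line, or consume a maximal non-blank run
-- (the inner 'while j < n and data[j] != \n' loop collecting 'parts' is the takeWhile/foldl,
-- ''.join(parts) is Str.join, 'i = j' the dropWhile).
-- The Nat argument is FUEL making the recursion structural (each step consumes ≥ 1 line,
-- so fuel = length of the list never runs out); it adds nothing to the algorithm.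
def get_altGo : Nat → List String → List String → List String
  | _, poems, [] => poems
  | 0, poems, _ => poems
  | Nat.succ f, poems, x :: xs =>
    if x == "\n" then get_altGo f poems xs
    else
      let run := x :: xs.takeWhile (fun y => !(y == "\n"))
      let rest := xs.dropWhile (fun y => !(y == "\n"))
      let parts := run.foldl (fun acc it => acc ++ [stripNl it]) []
      let s := PySem.Str.join "" parts
      get_altGo f (if s == "" then poems else poems ++ [s]) rest

def get_alt (data : List String) : List String := get_altGo data.length [] data

-- ===== PRECONDITION & SPEC =====
-- Pre_ excludes lists containing the empty string "", on which both A and B raise IndexError at it[-1]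
def Pre_get (data : List String) : Prop := "" ∉ data
instance (data : List String) : Decidable (Pre_get data) := by unfold Pre_get; infer_instance
def pvWitness_get : List String := ["hi\n", "there\n", "\n", "you\n", "x", "\n"]

def Spec_get (data : List String) (out : List String) : Prop := out = get_alt data
instance (data : List String) (out : List String) : Decidable (Spec_get data out) := by unfold Spec_get; infer_instance

-- ===== CLAIM (what is proved, stated in full; the proofs are below) =====
def Claim_equal_get : Prop := ∀ (data : List String), Dom_get data → Pre_get data → Spec_get data (get data)

-- ===== LEMMAS AND PROOFS =====

-- A's post-loop flush, factored out for the proofs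
def finA (st : List String × String) : List String :=
  if st.2 == "" then st.1 else st.1 ++ [st.2]

-- reference function: the poems still to be produced, given the pending accumulator 'cur'
def pvR (cur : String) (l : List String) : List String :=
  match l with
  | [] => if cur == "" then [] else [cur]
  | x :: xs =>
    if x == "\n" then (if cur == "" then [] else [cur]) ++ pvR "" xs
    else pvR (cur ++ stripNl x) xs

-- A's loop computes pvR
theorem foldA_eq (data : List String) : ∀ (poems : List String) (cur : String),
    finA (data.foldl getStep (poems, cur)) = poems ++ pvR cur data := by
  induction data with
  | nil =>
    intro poems cur
    by_cases hc : (cur == "") = true <;> simp [finA, pvR, hc]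
  | cons x xs ih =>
    intro poems cur
    rw [List.foldl_cons]
    by_cases hx : (x == "\n") = true
    · by_cases hc : (cur == "") = true
      · have hstep : getStep (poems, cur) x = (poems, cur) := by
          unfold getStep; rw [if_pos hx, if_pos hc]
        have hc' : cur = "" := by simpa using hc
        rw [hstep, ih poems cur, hc']
        simp [pvR, hx]
      · have hstep : getStep (poems, cur) x = (poems ++ [cur], "") := by
          unfold getStep; rw [if_pos hx, if_neg hc]
        rw [hstep, ih (poems ++ [cur]) ""]
        simp [pvR, hx, hc]
    · have hstep : getStep (poems, cur) x = (poems, cur ++ stripNl x) := by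
        unfold getStep stripNl
        rw [if_neg hx]
        by_cases hn : (PySem.Str.pyGet? x (-1) == some '\n') = true
        · rw [if_pos hn, if_pos hn]
        · rw [if_neg hn, if_neg hn]
      rw [hstep, ih poems (cur ++ stripNl x)]
      simp [pvR, hx]

-- pvR over a run of non-blank lines accumulates their stripped concatenation
theorem pvR_nonblank_run (run : List String) : ∀ (cur : String) (rest : List String),
    (∀ y ∈ run, (y == "\n") = false) →
    pvR cur (run ++ rest) = pvR (run.foldl (fun a it => a ++ stripNl it) cur) rest := by
  induction run with
  | nil => intro cur rest _; simp
  | cons y t ih =>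
    intro cur rest h
    have hy : (y == "\n") = false := h y (List.mem_cons_self ..)
    simp only [List.cons_append, pvR, hy, Bool.false_eq_true, if_false, List.foldl_cons]
    exact ih (cur ++ stripNl y) rest (fun z hz => h z (List.mem_cons_of_mem _ hz))

-- flushing the accumulator when the remainder is empty or starts with a blank line
theorem pvR_flush (s : String) (rest : List String)
    (h : rest = [] ∨ ∃ y ys, rest = y :: ys ∧ (y == "\n") = true) :
    pvR s rest = (if s == "" then [] else [s]) ++ pvR "" rest := by
  rcases h with h | ⟨y, ys, rfl, hy⟩
  · subst h; simp [pvR]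
  · simp [pvR, hy]

-- the head of dropWhile fails the predicate
theorem dropWhile_head (p : String → Bool) (l : List String) :
    l.dropWhile p = [] ∨ ∃ y ys, l.dropWhile p = y :: ys ∧ p y = false := by
  induction l with
  | nil => left; rfl
  | cons x xs ih =>
    by_cases hx : p x
    · simpa [List.dropWhile_cons, hx] using ih
    · right; exact ⟨x, xs, by simp [hx], by simpa using hx⟩

-- ''.join on a cons
theorem join_empty_cons (x : String) (t : List String) :
    PySem.Str.join "" (x :: t) = x ++ PySem.Str.join "" t := by
  rw [← String.toList_inj, String.toList_append, PySem.Str.toList_join, PySem.Str.toList_join]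
  cases t with
  | nil => simp [PySem.Chars.join_singleton, PySem.Chars.join_nil]
  | cons y u =>
    rw [List.map_cons, List.map_cons, PySem.Chars.join_cons_cons]
    simp

theorem foldl_append_shift (l : List String) : ∀ (a : String),
    l.foldl (fun x s => x ++ s) a = a ++ l.foldl (fun x s => x ++ s) "" := by
  induction l with
  | nil => intro a; simp
  | cons x t ih =>
    intro a
    simp only [List.foldl_cons]
    rw [ih (a ++ x), ih ("" ++ x)]
    simp [String.append_assoc]

theorem join_eq_foldl (l : List String) : PySem.Str.join "" l = l.foldl (fun a s => a ++ s) "" := by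
  induction l with
  | nil => rfl
  | cons x t ih =>
    rw [join_empty_cons, List.foldl_cons, foldl_append_shift t ("" ++ x), ih]
    simp

-- Source B's parts list, joined, is the direct string accumulation
theorem join_parts (run : List String) :
    PySem.Str.join "" (run.foldl (fun acc it => acc ++ [stripNl it]) []) =
      run.foldl (fun a it => a ++ stripNl it) "" := by
  rw [PySem.List.foldl_append_singleton_eq_map, List.nil_append, join_eq_foldl, List.foldl_map]

-- one maximal non-blank run, seen through pvR
theorem pvR_cons_nonblank (x : String) (xs : List String) (hx : (x == "\n") = false) :
    pvR "" (x :: xs) =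
      (if (x :: xs.takeWhile (fun y => !(y == "\n"))).foldl (fun a it => a ++ stripNl it) "" == ""
       then []
       else [(x :: xs.takeWhile (fun y => !(y == "\n"))).foldl (fun a it => a ++ stripNl it) ""]) ++
      pvR "" (xs.dropWhile (fun y => !(y == "\n"))) := by
  have hsplit : x :: xs =
      (x :: xs.takeWhile (fun y => !(y == "\n"))) ++ xs.dropWhile (fun y => !(y == "\n")) := by
    simp [List.takeWhile_append_dropWhile]
  have hrunnb : ∀ y ∈ x :: xs.takeWhile (fun y => !(y == "\n")), (y == "\n") = false := by
    intro y hy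
    rcases List.mem_cons.mp hy with rfl | hy'
    · exact hx
    · have := List.mem_takeWhile_imp hy'
      simpa using this
  conv_lhs => rw [hsplit]
  rw [pvR_nonblank_run _ "" _ hrunnb]
  apply pvR_flush
  rcases dropWhile_head (fun y => !(y == "\n")) xs with h0 | ⟨y, ys, hyy, hyp⟩
  · left; exact h0
  · right; exact ⟨y, ys, hyy, by simpa using hyp⟩

-- B's loop computes pvR
theorem go_eq : ∀ (f : Nat) (data : List String), data.length ≤ f → ∀ (poems : List String),
    get_altGo f poems data = poems ++ pvR "" data := by
  intro f
  induction f with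
  | zero =>
    intro data hlen poems
    have : data = [] := by
      cases data with
      | nil => rfl
      | cons a b => simp at hlen
    subst this
    simp [get_altGo, pvR]
  | succ f ih =>
    intro data hlen poems
    cases data with
    | nil => simp [get_altGo, pvR]
    | cons x xs =>
      simp only [get_altGo]
      rw [join_parts]
      by_cases hx : (x == "\n") = true
      · rw [if_pos hx, ih xs (by simp at hlen; omega) poems]
        simp [pvR, hx]
      · rw [if_neg hx,
          ih (xs.dropWhile (fun y => !(y == "\n")))
            (by have := List.length_dropWhile_le (fun y => !(y == "\n")) xs
                simp at hlen; omega),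
          pvR_cons_nonblank x xs (by simpa using hx)]
        by_cases hs : ((x :: xs.takeWhile (fun y => !(y == "\n"))).foldl
            (fun a it => a ++ stripNl it) "" == "") = true
        · rw [if_pos hs, if_pos hs]; simp
        · rw [if_neg hs, if_neg hs]; simp

-- ===== VERDICT (by name: the statement is the Claim_ definition above) =====
theorem get_spec : Claim_equal_get := by
  intro data _ _
  unfold Spec_get
  have hA : get data = finA (data.foldl getStep ([], "")) := rfl
  rw [hA, foldA_eq data [] "", get_alt, go_eq data.length data le_rfl []]
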